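-- pv_equiv track=rewrite | github.com/lutacluny/Sheet-Music-Recognition | separate_groups_of_notes.py | calc_spaces_between_lines
-- ===== SOURCE A (Python) =====
-- def calc_spaces_between_lines(col):
--     is_between_to_lines = False
--     is_prev_black = False
--
--     spaces_between_lines = []
--
--     pixel_between_lines = 0
--     amout_black_pixel = 0
--
--     for pixel in col:
--         if is_between_to_lines and isWhite(pixel):
--             pixel_between_lines += 1
--
--         elif is_between_to_lines and isBlack(pixel) and not is_prev_black:
--             amout_black_pixel += 1
--             spaces_between_lines.append(pixel_between_lines)
--             is_prev_black = True
--             is_between_to_lines = False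
--             pixel_between_lines = 0
--
--         elif is_prev_black and isWhite(pixel):
--             is_prev_black = False
--             is_between_to_lines = True
--
--             pixel_between_lines += 1
--
--         elif isBlack(pixel):
--             is_prev_black = True
--             amout_black_pixel += 1
--
--     return spaces_between_lines, amout_black_pixel
--
-- def isBlack(pixel):
--     if pixel == True:
--         return False
--     else:
--         return True
--
-- def isWhite(pixel):
--     return not isBlack(pixel)
-- ===== SOURCE B (Python) =====
-- def isBlack(pixel):
--     if pixel == True:
--         return False
--     else:
--         return True
--
-- def calc_spaces_between_lines(col):
--     # run-length encode the column: [[is_white, length], ...]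
--     runs = []
--     for pixel in col:
--         w = not isBlack(pixel)
--         if runs and runs[-1][0] == w:
--             runs[-1][1] += 1
--         else:
--             runs.append([w, 1])
--     amout_black_pixel = sum(n for w, n in runs if not w)
--     # interior white runs only: never the first or the last run
--     spaces_between_lines = [n for w, n in runs[1:-1] if w]
--     return spaces_between_lines, amout_black_pixel
-- ===== Notes on version B (the rewrite author's own statement) =====
-- stated objective: simpler
-- what changed: Replaces A's five-variable state machine with a run-length encoding of the column: the black-pixel count is the sum of black-run lengths and the gaps are the interior white runs (runs[1:-1]).
import Mathlib
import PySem

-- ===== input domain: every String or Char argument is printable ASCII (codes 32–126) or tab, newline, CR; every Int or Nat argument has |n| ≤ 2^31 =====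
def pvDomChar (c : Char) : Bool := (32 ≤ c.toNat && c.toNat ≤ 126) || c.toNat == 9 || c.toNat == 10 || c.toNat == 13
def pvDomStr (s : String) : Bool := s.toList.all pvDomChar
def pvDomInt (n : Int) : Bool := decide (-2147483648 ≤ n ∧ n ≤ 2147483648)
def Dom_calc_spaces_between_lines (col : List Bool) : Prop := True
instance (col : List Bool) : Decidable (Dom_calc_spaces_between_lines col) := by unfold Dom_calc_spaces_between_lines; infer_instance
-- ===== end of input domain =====

-- B replaces A's five-variable state machine by a run-length encoding of the column,
-- then reads the answers off the runs (sum of black-run lengths; interior white runs);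
-- objective: simpler. Same O(n) cost.

-- ===== PORT A =====
def isBlack (pixel : Bool) : Bool := if pixel == true then false else true

def isWhite (pixel : Bool) : Bool := !(isBlack pixel)

-- A's loop body, one step of the state machine (btw, prev, spaces, pb, black)
def stepA (st : Bool × Bool × List Int × Int × Int) (pixel : Bool) :
    Bool × Bool × List Int × Int × Int :=
  match st with
  | (btw, prev, spaces, pb, black) =>
    if btw && isWhite pixel then (btw, prev, spaces, pb + 1, black)
    else if btw && isBlack pixel && !prev then (false, true, spaces ++ [pb], 0, black + 1)
    else if prev && isWhite pixel then (true, false, spaces, pb + 1, black)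
    else if isBlack pixel then (btw, true, spaces, pb, black + 1)
    else (btw, prev, spaces, pb, black)

def calc_spaces_between_lines (col : List Bool) : List Int × Int :=
  let s := col.foldl stepA (false, false, ([] : List Int), (0 : Int), (0 : Int))
  (s.2.2.1, s.2.2.2.2)

-- ===== PORT B =====
-- one step of the run-length encoding loop (runs[-1][1] += 1 keeps the colour)
def rleStep (runs : List (Bool × Int)) (pixel : Bool) : List (Bool × Int) :=
  let w := !(isBlack pixel)
  match runs.getLast? with
  | some (c, n) => if c == w then runs.dropLast ++ [(c, n + 1)] else runs ++ [(w, 1)]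
  | none => [(w, 1)]

-- sum(n for w, n in runs if not w)
def blackOf (runs : List (Bool × Int)) : Int :=
  (runs.filter (fun r => !r.1)).foldl (fun a r => a + r.2) 0

-- [n for w, n in runs[1:-1] if w]
def gapsOf (runs : List (Bool × Int)) : List Int :=
  ((PySem.List.slice runs (some 1) (some (-1))).filter (fun r => r.1)).map (fun r => r.2)

def calc_spaces_between_lines_alt (col : List Bool) : List Int × Int :=
  let runs := col.foldl rleStep []
  (gapsOf runs, blackOf runs)

-- ===== PRECONDITION & SPEC =====
def Spec_calc_spaces_between_lines (col : List Bool) (out : List Int × Int) : Prop := out = calc_spaces_between_lines_alt col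
instance (col : List Bool) (out : List Int × Int) : Decidable (Spec_calc_spaces_between_lines col out) := by unfold Spec_calc_spaces_between_lines; infer_instance

-- ===== CLAIM (what is proved, stated in full; the proofs are below) =====
def Claim_equal_calc_spaces_between_lines : Prop := ∀ (col : List Bool), Dom_calc_spaces_between_lines col → Spec_calc_spaces_between_lines col (calc_spaces_between_lines col)

-- ===== LEMMAS AND PROOFS =====

theorem isBlack_eq (p : Bool) : isBlack p = !p := by cases p <;> rfl

theorem isWhite_eq (p : Bool) : isWhite p = p := by cases p <;> simp [isWhite, isBlack_eq]

-- A's state as a function of the runs built so far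
def phi (runs : List (Bool × Int)) : Bool × Bool × List Int × Int × Int :=
  match runs.getLast? with
  | none => (false, false, [], 0, 0)
  | some (c, n) =>
    (c && decide (2 ≤ runs.length), !c, gapsOf runs,
     if c && decide (2 ≤ runs.length) then n else 0, blackOf runs)

theorem slice_one_negone {α : Type} (xs : List α) :
    PySem.List.slice xs (some 1) (some (-1)) = (xs.drop 1).dropLast := by
  cases xs with
  | nil => rfl
  | cons a t =>
    simp [PySem.List.slice, PySem.List.clampIdx, List.dropLast_eq_take]
    split_ifs <;> omega

theorem gapsOf_eq (runs : List (Bool × Int)) :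
    gapsOf runs = ((runs.drop 1).dropLast.filter (fun r => r.1)).map (fun r => r.2) := by
  rw [gapsOf, slice_one_negone]

theorem blackOf_append (xs : List (Bool × Int)) (c : Bool) (n : Int) :
    blackOf (xs ++ [(c, n)]) = blackOf xs + (if c then 0 else n) := by
  cases c <;> simp [blackOf, List.filter_append, List.foldl_append]

theorem getLast?_cons_append {α : Type} (d : α) (ds : List α) (x : α) :
    (d :: (ds ++ [x])).getLast? = some x := by
  rw [← List.cons_append]; exact List.getLast?_concat

theorem dropLast_cons_append {α : Type} (d : α) (ds : List α) (x : α) :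
    (d :: (ds ++ [x])).dropLast = d :: ds := by
  rw [← List.cons_append]; exact List.dropLast_concat

theorem blackOf_cons_append (d : Bool × Int) (ds : List (Bool × Int)) (c : Bool) (n : Int) :
    blackOf (d :: (ds ++ [(c, n)])) = blackOf (d :: ds) + (if c then 0 else n) := by
  rw [← List.cons_append, blackOf_append]

theorem getLast?_cons_append₂ {α : Type} (d : α) (ds : List α) (x y : α) :
    (d :: (ds ++ [x, y])).getLast? = some y := by
  have h : ds ++ [x, y] = (ds ++ [x]) ++ [y] := by simp
  rw [h]; exact getLast?_cons_append d (ds ++ [x]) y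

theorem blackOf_cons_append₂ (d : Bool × Int) (ds : List (Bool × Int)) (x y : Bool × Int) :
    blackOf (d :: (ds ++ [x, y])) = blackOf (d :: ds) + (if x.1 then 0 else x.2) + (if y.1 then 0 else y.2) := by
  have h : ds ++ [x, y] = (ds ++ [x]) ++ [y] := by simp
  rw [h, ← List.cons_append, ← List.cons_append, blackOf_append, List.cons_append, blackOf_cons_append]

theorem step_phi (runs : List (Bool × Int)) (p : Bool) :
    stepA (phi runs) p = phi (rleStep runs p) := by
  rcases List.eq_nil_or_concat runs with h | ⟨L, ⟨c, n⟩, h⟩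
  · subst h; cases p <;> rfl
  · subst h
    cases L with
    | nil =>
      cases c <;> cases p <;>
        simp [stepA, rleStep, phi, isBlack_eq, isWhite_eq, gapsOf_eq, blackOf]
    | cons d ds =>
      cases c <;> cases p <;>
        simp [stepA, rleStep, phi, isBlack_eq, isWhite_eq, gapsOf_eq, blackOf_cons_append,
              getLast?_cons_append, dropLast_cons_append, getLast?_cons_append₂,
              blackOf_cons_append₂, add_assoc, List.filter_append, List.map_append]

theorem foldl_phi (l : List Bool) (runs : List (Bool × Int)) :
    l.foldl stepA (phi runs) = phi (l.foldl rleStep runs) := by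
  induction l generalizing runs with
  | nil => rfl
  | cons p l ih => simp [List.foldl_cons, step_phi, ih]

-- ===== VERDICT (by name: the statement is the Claim_ definition above) =====
theorem calc_spaces_between_lines_spec : Claim_equal_calc_spaces_between_lines := by
  intro col _
  unfold Spec_calc_spaces_between_lines calc_spaces_between_lines calc_spaces_between_lines_alt
  have h0 : (false, false, ([] : List Int), (0 : Int), (0 : Int)) = phi [] := rfl
  rw [h0, foldl_phi]
  rcases h : (col.foldl rleStep []).getLast? with _ | ⟨c, n⟩ <;>
      simp [phi, h]
  · have : col.foldl rleStep [] = [] := List.getLast?_eq_none_iff.mp h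
    simp [this, gapsOf, blackOf, PySem.List.slice]
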